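-- pv_equiv track=rewrite | github.com/LimMinKyo/Programmers | Level 2/서버 증설 횟수/solution.py | solution
-- ===== SOURCE A (Python) =====
-- def solution(players, m, k):
--     servers = [0] * 24
--
--     for i in range(len(players)):
--         servers_range = servers[i - k + 1 : i] if i - k + 1 >= 0 else servers[:i]
--         added_servers = sum(servers_range)
--         servers_required = players[i] // m
--
--         if added_servers < servers_required:
--             servers[i] = servers_required - added_servers
--
--     return sum(servers)
-- ===== SOURCE B (Python) =====
-- def solution(players, m, k):
--     added = []      # servers added at each hour
--     window = 0      # sum of added[max(0, i-k+1) : i]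
--     total = 0
--     for i, p in enumerate(players):
--         required = p // m
--         extra = required - window if window < required else 0
--         added.append(extra)
--         total += extra
--         window += extra
--         j = i - k + 1
--         if j >= 0:
--             window -= added[j]
--     return total
-- ===== Notes on version B (the rewrite author's own statement) =====
-- stated objective: faster
-- what changed: Replaces the per-hour re-summation of a slice of the fixed 24-slot servers array with a single pass that maintains the sliding-window sum incrementally (add the just-assigned servers, subtract the one leaving the window), accumulating the total directly.
-- outside the precondition, e.g. on solution([5], 1, 0): A returns 5, B raises IndexError
import Mathlib
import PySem

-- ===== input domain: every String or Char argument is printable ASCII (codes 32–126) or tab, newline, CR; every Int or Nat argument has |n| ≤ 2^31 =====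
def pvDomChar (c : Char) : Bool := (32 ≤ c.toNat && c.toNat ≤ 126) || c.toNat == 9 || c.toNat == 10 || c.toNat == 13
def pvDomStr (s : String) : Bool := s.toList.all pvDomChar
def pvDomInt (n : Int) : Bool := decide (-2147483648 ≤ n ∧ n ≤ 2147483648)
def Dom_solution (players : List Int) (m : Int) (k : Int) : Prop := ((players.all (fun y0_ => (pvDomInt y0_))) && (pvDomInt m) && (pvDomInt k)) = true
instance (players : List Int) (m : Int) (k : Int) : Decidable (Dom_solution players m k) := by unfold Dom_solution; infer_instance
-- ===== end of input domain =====

-- B replaces A's per-hour re-summation of a slice of the 24-slot servers table by a single pass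
-- that maintains the sliding-window sum incrementally (objective: faster).

-- ===== PORT A =====
-- Loop body of A, literal. players[i] is in range for every i of the loop, so pyGetD is exact;
-- servers[i] = v is pySetD, exact under Pre_ (players.length ≤ 24 keeps i in range).
def aStep (players : List Int) (m : Int) (k : Int) (servers : List Int) (i : Int) : List Int :=
  let servers_range := if i - k + 1 ≥ 0 then PySem.List.slice servers (some (i - k + 1)) (some i)
                       else PySem.List.slice servers none (some i)
  let added_servers := servers_range.sum
  let servers_required := PySem.Int.floordiv (PySem.List.pyGetD players i 0) m
  if added_servers < servers_required then
    PySem.List.pySetD servers i (servers_required - added_servers)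
  else servers

def solution (players : List Int) (m : Int) (k : Int) : Int :=
  ((PySem.List.pyRange 0 (players.length : Int) 1).foldl (aStep players m k)
    (List.replicate 24 0)).sum

-- ===== PORT B =====
-- Loop body of Source B, literal; state = (added, window, total). added[j] has 0 ≤ j < len(added)
-- under Pre_ (1 ≤ k), so pyGetD is exact.
def bStep (m : Int) (k : Int) (st : List Int × Int × Int) (ip : Int × Int) : List Int × Int × Int :=
  let required := PySem.Int.floordiv ip.2 m
  let extra := if st.2.1 < required then required - st.2.1 else 0
  let added := st.1 ++ [extra]
  let total := st.2.2 + extra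
  let window := st.2.1 + extra
  let j := ip.1 - k + 1
  let window2 := if j ≥ 0 then window - PySem.List.pyGetD added j 0 else window
  (added, window2, total)

def solution_alt (players : List Int) (m : Int) (k : Int) : Int :=
  ((PySem.List.enumerate players 0).foldl (bStep m k) ([], 0, 0)).2.2

-- ===== PRECONDITION & SPEC =====
-- Pre_ excludes: m = 0 (A raises ZeroDivisionError); player lists longer than A's fixed 24-slot
-- table (the problem's domain is 24 hours; past slot 23 A raises IndexError whenever a server
-- must be added, so whether A returns there at all is an accident of the data); and k ≤ 0, a
-- degenerate window on which B's own sliding-window index added[i-k+1] raises IndexError.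
def Pre_solution (players : List Int) (m : Int) (k : Int) : Prop :=
  m ≠ 0 ∧ 1 ≤ k ∧ players.length ≤ 24
instance (players : List Int) (m : Int) (k : Int) : Decidable (Pre_solution players m k) := by
  unfold Pre_solution; infer_instance
def pvWitness_solution : List Int × Int × Int := ([10, 3, 7, 12], 3, 2)
def Spec_solution (players : List Int) (m : Int) (k : Int) (out : Int) : Prop := out = solution_alt players m k
instance (players : List Int) (m : Int) (k : Int) (out : Int) : Decidable (Spec_solution players m k out) := by unfold Spec_solution; infer_instance

-- ===== CLAIM (what is proved, stated in full; the proofs are below) =====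
def Claim_equal_solution : Prop := ∀ (players : List Int) (m : Int) (k : Int), Dom_solution players m k → Pre_solution players m k → Spec_solution players m k (solution players m k)

-- ===== LEMMAS AND PROOFS =====

-- Reference model: the list of servers added per hour, built left to right.
-- pvWin k a = sum of a[max(0, len(a)+1-k) :], the window A sums and B maintains.
def pvWin (k : Int) (a : List Int) : Int :=
  (a.drop (((a.length : Int) + 1 - k).toNat)).sum

def pvStep (m : Int) (k : Int) (a : List Int) (p : Int) : List Int :=
  let w := pvWin k a
  let r := PySem.Int.floordiv p m
  a ++ [if w < r then r - w else 0]

lemma length_foldl_pvStep (m k : Int) (xs : List Int) :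
    ∀ a : List Int, (xs.foldl (pvStep m k) a).length = a.length + xs.length := by
  induction xs with
  | nil => intro a; simp
  | cons x xs ih =>
    intro a
    rw [List.foldl_cons, ih]
    simp [pvStep]
    omega

-- How the window changes when one element is appended.
lemma pvWin_snoc (k : Int) (hk : 1  ≤ k) (a : List Int) (e : Int) :
    pvWin k (a ++ [e]) =
      if (a.length : Int) - k + 1 ≥ 0
      then pvWin k a + e - PySem.List.pyGetD (a ++ [e]) ((a.length : Int) - k + 1) 0
      else pvWin k a + e := by
  by_cases h : (a.length : Int) - k + 1 ≥ 0
  · set j : Nat := ((a.length : Int) + 1 - k).toNat with hjdef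
    have hj : (j : Int) = (a.length : Int) - k + 1 := by omega
    have hjn : j ≤ a.length := by omega
    have hjlt : j < (a ++ [e]).length := by simp; omega
    have hlen2 : (((a ++ [e]).length : Int) + 1 - k).toNat = j + 1 := by simp; omega
    have htoj : ((a.length : Int) - k + 1).toNat = j := by omega
    have hidx : PySem.List.pyGetD (a ++ [e]) ((a.length : Int) - k + 1) 0 = (a ++ [e])[j] := by
      rw [PySem.List.pyGetD_eq_getElem (a ++ [e]) 0 (by omega) (by simp; omega)]
      simp [htoj]
    have hcons := List.drop_eq_getElem_cons hjlt
    have hdropA : (a ++ [e]).drop j = a.drop j ++ [e] := List.drop_append_of_le_length hjn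
    simp only [pvWin, hlen2, ← hjdef, if_pos h, hidx]
    have h1 : ((a ++ [e]).drop (j + 1)).sum = ((a ++ [e]).drop j).sum - (a ++ [e])[j] := by
      rw [hcons]; simp only [List.sum_cons]; ring
    rw [h1, hdropA]
    simp only [List.sum_append, List.sum_cons, List.sum_nil]
    ring
  · have h0 : (((a.length : Int) + 1 - k).toNat) = 0 := by omega
    have h1 : (((a.length : Int) + 1 + 1 - k).toNat) = 0 := by omega
    simp [pvWin, if_neg h, h0, h1]

-- One step of B's loop, at index i = len(added), realises pvStep and keeps the invariant.
lemma bStep_spec (m k : Int) (hk : 1 ≤ k) (a : List Int) (c p : Int) :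
    bStep m k (a, pvWin k a, a.sum + c) ((a.length : Int), p)
      = (pvStep m k a p, pvWin k (pvStep m k a p),
         (pvStep m k a p).sum + c) := by
  simp only [bStep, pvStep, Prod.mk.injEq, true_and]
  refine ⟨?_, ?_⟩
  · exact (pvWin_snoc k hk a _).symm
  · simp only [List.sum_append, List.sum_cons, List.sum_nil]
    ring

-- B's whole loop, relative to any already-processed prefix a.
lemma b_loop (m k : Int) (hk : 1 ≤ k) (xs : List Int) :
    ∀ (a : List Int) (c : Int),
      (PySem.List.enumerate xs (a.length : Int)).foldl (bStep m k) (a, pvWin k a, a.sum + c)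
        = (xs.foldl (pvStep m k) a, pvWin k (xs.foldl (pvStep m k) a),
           (xs.foldl (pvStep m k) a).sum + c) := by
  induction xs with
  | nil => intro a c; simp [PySem.List.enumerate]
  | cons x xs ih =>
    intro a c
    have hcons : PySem.List.enumerate (x :: xs) (a.length : Int)
        = ((a.length : Int), x) :: PySem.List.enumerate xs ((a.length : Int) + 1) := by
      simp [PySem.List.enumerate]
    have hlen : ((a.length : Int) + 1) = (((pvStep m k a x).length : Int)) := by
      simp [pvStep]
    rw [hcons, List.foldl_cons, bStep_spec m k hk a c x, hlen, ih]
    simp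

-- One step of A's loop, at index t, on servers = a ++ zeros.
lemma aStep_spec (players : List Int) (m k : Int) (hk : 1 ≤ k) (t : Nat)
    (ht : t < players.length) (h24 : players.length ≤ 24) (a : List Int) (ha : a.length = t) :
    aStep players m k (a ++ List.replicate (24 - t) 0) (t : Int)
      = pvStep m k a players[t] ++ List.replicate (24 - (t + 1)) 0 := by
  have ht24 : t < 24 := by omega
  have hlens : (a ++ List.replicate (24 - t) (0 : Int)).length = 24 := by simp; omega
  -- the summed range is exactly pvWin k a
  have hsum : (if (t : Int) - k + 1 ≥ 0
      then PySem.List.slice (a ++ List.replicate (24 - t) 0) (some ((t : Int) - k + 1)) (some (t : Int))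
      else PySem.List.slice (a ++ List.replicate (24 - t) 0) none (some (t : Int))).sum
      = pvWin k a := by
    by_cases h : (t : Int) - k + 1 ≥ 0
    · have hj : (((a.length : Int) + 1 - k).toNat : Int) = (t : Int) - k + 1 := by
        rw [ha]; omega
      set j : Nat := ((a.length : Int) + 1 - k).toNat with hjdef
      have hjt : j ≤ t := by omega
      rw [if_pos h, ← hj, PySem.List.slice_toNat _ (by omega) (by omega)]
      simp only [Int.toNat_natCast]
      have hdrop : (a ++ List.replicate (24 - t) (0 : Int)).drop j
          = a.drop j ++ List.replicate (24 - t) 0 :=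
        List.drop_append_of_le_length (by omega)
      rw [hdrop, List.take_left' (by simp; omega)]
      simp only [pvWin, ← hjdef]
    · have h0 : (((a.length : Int) + 1 - k).toNat) = 0 := by rw [ha]; omega
      rw [if_neg h, PySem.List.slice_to _ (by omega)]
      have : ((t : Int)).toNat = t := by omega
      rw [this, List.take_left' (by omega)]
      simp [pvWin, h0]

  have hget : PySem.Int.floordiv (PySem.List.pyGetD players (t : Int) 0) m
      = PySem.Int.floordiv players[t] m := by
    rw [PySem.List.pyGetD_eq_getElem players 0 (by omega) (by exact_mod_cast ht)]
    simp
  have hrep : List.replicate (24 - t) (0 : Int) = 0 :: List.replicate (24 - (t + 1)) 0 := by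
    have : 24 - t = (24 - (t + 1)) + 1 := by omega
    rw [this, List.replicate_succ]
  simp only [aStep, hsum, hget, pvStep]
  set r := PySem.Int.floordiv players[t] m
  set w := pvWin k a
  by_cases hw : w < r
  · rw [if_pos hw, if_pos hw, PySem.List.pySetD_of_nonneg _ _ (by omega)]
    have htt : ((t : Int)).toNat = t := by omega
    rw [htt, List.set_append, if_neg (by omega)]
    rw [hrep, ha]
    simp
  · rw [if_neg hw, if_neg hw, hrep]
    simp

-- A's whole loop builds the reference list padded with the untouched zero slots.
lemma a_loop (players : List Int) (m k : Int) (hk : 1 ≤ k) (h24 : players.length ≤ 24) :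
    ∀ t : Nat, t ≤ players.length →
      (PySem.List.pyRange 0 (t : Int) 1).foldl (aStep players m k) (List.replicate 24 0)
        = (players.take t).foldl (pvStep m k) [] ++ List.replicate (24 - t) 0 := by
  intro t
  induction t with
  | zero => intro _; simp [PySem.List.pyRange_one_eq_nil]
  | succ t ih =>
    intro ht
    have htlt : t < players.length := by omega
    have hsplit : PySem.List.pyRange 0 ((t + 1 : Nat) : Int) 1
        = PySem.List.pyRange 0 (t : Int) 1 ++ [(t : Int)] := by
      have : ((t + 1 : Nat) : Int) = (t : Int) + 1 := by push_cast; ring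
      rw [this, PySem.List.pyRange_one_succ_right (by omega)]
    have htake : players.take (t + 1) = players.take t ++ [players[t]] := by
      rw [List.take_add_one]
      simp [List.getElem?_eq_getElem htlt]
    rw [hsplit, List.foldl_append, ih (by omega), List.foldl_cons]
    rw [aStep_spec players m k hk t htlt h24 _ (by simp [length_foldl_pvStep]; omega)]
    rw [htake, List.foldl_append]
    simp

-- ===== VERDICT (by name: the statement is the Claim_ definition above) =====
theorem solution_spec : Claim_equal_solution := by
  intro players m k _hdom hpre
  obtain ⟨hm, hk, h24⟩ := hpre
  unfold Spec_solution solution solution_alt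
  rw [a_loop players m k hk h24 players.length le_rfl]
  have hb := b_loop m k hk players ([] : List Int) 0
  simp only [List.length_nil, Int.natCast_zero] at hb
  have hwin : pvWin k ([] : List Int) = 0 := by simp [pvWin]
  rw [hwin] at hb
  simp only [List.sum_nil, zero_add] at hb
  rw [hb]
  simp
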